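-- pv_equiv track=rewrite | github.com/bee-san/Ares | tmp_ctf_final_pass/PicoCTF-2026-writeups/MultiCode/solve.py | try_rot13
-- ===== SOURCE A (Python) =====
-- def try_rot13(data: str):
--     """Apply ROT13.  Always succeeds, so we only use it when other decoders fail
--        and the result looks more 'flag-like'."""
--     stripped = data.strip()
--     if not stripped:
--         return None
--     # ROT13 only makes sense on text that has letters
--     if not any(c.isalpha() for c in stripped):
--         return None
--     table = str.maketrans(
--         'ABCDEFGHIJKLMNOPQRSTUVWXYZabcdefghijklmnopqrstuvwxyz',
--         'NOPQRSTUVWXYZABCDEFGHIJKLMnopqrstuvwxyzabcdefghijklm'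
--     )
--     return stripped.translate(table)
-- ===== SOURCE B (Python) =====
-- def try_rot13(data: str):
--     # Single fused pass: build the rotated text and discover whether any letter
--     # exists in the same loop; the empty/no-letter guards collapse into one flag.
--     out = []
--     has_alpha = False
--     for c in data.strip():
--         o = ord(c)
--         if 65 <= o <= 90:
--             out.append(chr(65 + (o - 52) % 26))
--             has_alpha = True
--         elif 97 <= o <= 122:
--             out.append(chr(97 + (o - 84) % 26))
--             has_alpha = True
--         else:
--             out.append(c)
--     return ''.join(out) if has_alpha else None
-- ===== Notes on version B (the rewrite author's own statement) =====
-- stated objective: alternative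
-- what changed: Replaces A's staged design (emptiness guard, separate any(isalpha) scan, then a 52-entry maketrans table applied by translate) with one fused loop that simultaneously builds the rotated text arithmetically and tracks a has-letter flag, deciding None at the end from that flag alone.
import Mathlib
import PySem

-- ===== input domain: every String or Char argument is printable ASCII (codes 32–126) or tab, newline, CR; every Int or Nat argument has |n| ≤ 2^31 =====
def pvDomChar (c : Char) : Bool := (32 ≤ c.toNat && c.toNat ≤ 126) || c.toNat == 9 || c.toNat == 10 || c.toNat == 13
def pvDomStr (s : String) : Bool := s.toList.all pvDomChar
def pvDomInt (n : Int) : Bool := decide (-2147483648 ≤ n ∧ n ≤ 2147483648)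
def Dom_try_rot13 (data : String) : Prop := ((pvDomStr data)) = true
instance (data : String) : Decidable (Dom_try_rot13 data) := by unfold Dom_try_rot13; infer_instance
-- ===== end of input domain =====

-- B fuses A's separate any(isalpha) scan and maketrans/translate table pass into one
-- loop that builds the rotated text arithmetically while tracking a has-letter flag
-- (objective: alternative decomposition; equivalence proved on the ASCII domain Dom).


-- ===== PORT A =====
-- str.maketrans(src, dst) builds a char→char mapping; translate looks each char up,
-- leaving unmapped chars unchanged.  Ported as a zipped association list with first-match lookup.
def rot13Table : List (Char × Char) :=
  List.zip "ABCDEFGHIJKLMNOPQRSTUVWXYZabcdefghijklmnopqrstuvwxyz".toList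
           "NOPQRSTUVWXYZABCDEFGHIJKLMnopqrstuvwxyzabcdefghijklm".toList

def translateChar (c : Char) : Char := (rot13Table.lookup c).getD c

def try_rot13 (data : String) : Option String :=
  let stripped := PySem.Str.strip data
  if stripped.toList = [] then none
  else if ¬ (stripped.toList.any PySem.Chars.isalpha) then none
  else some (String.ofList (stripped.toList.map translateChar))

-- ===== PORT B =====
-- one fused pass: (out, has_alpha) accumulator, per-char arithmetic ROT13
def rotStep (st : List Char × Bool) (c : Char) : List Char × Bool :=
  if 65 ≤ c.toNat ∧ c.toNat ≤ 90 then (st.1 ++ [Char.ofNat (65 + (c.toNat - 52) % 26)], true)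
  else if 97 ≤ c.toNat ∧ c.toNat ≤ 122 then (st.1 ++ [Char.ofNat (97 + (c.toNat - 84) % 26)], true)
  else (st.1 ++ [c], st.2)

def try_rot13_alt (data : String) : Option String :=
  let st := (PySem.Str.strip data).toList.foldl rotStep ([], false)
  if st.2 then some (String.ofList st.1) else none

-- ===== PRECONDITION & SPEC =====
def Spec_try_rot13 (data : String) (out : Option String) : Prop := out = try_rot13_alt data
instance (data : String) (out : Option String) : Decidable (Spec_try_rot13 data out) := by unfold Spec_try_rot13; infer_instance

-- ===== CLAIM (what is proved, stated in full; the proofs are below) =====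
def Claim_equal_try_rot13 : Prop := ∀ (data : String), Dom_try_rot13 data → Spec_try_rot13 data (try_rot13 data)

-- ===== LEMMAS AND PROOFS =====

-- proof-only characterisations of B's fold step
def rotCharB (c : Char) : Char :=
  if 65 ≤ c.toNat ∧ c.toNat ≤ 90 then Char.ofNat (65 + (c.toNat - 52) % 26)
  else if 97 ≤ c.toNat ∧ c.toNat ≤ 122 then Char.ofNat (97 + (c.toNat - 84) % 26)
  else c

def asciiAlpha (c : Char) : Bool :=
  decide ((65 ≤ c.toNat ∧ c.toNat ≤ 90) ∨ (97 ≤ c.toNat ∧ c.toNat ≤ 122))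

theorem foldl_rotStep (l : List Char) (acc : List Char) (b : Bool) :
    l.foldl rotStep (acc, b) = (acc ++ l.map rotCharB, b || l.any asciiAlpha) := by
  induction l generalizing acc b with
  | nil => simp
  | cons c l ih =>
    simp only [List.foldl_cons, List.map_cons, List.any_cons]
    rw [rotStep, rotCharB]
    by_cases h1 : 65 ≤ c.toNat ∧ c.toNat ≤ 90
    · simp [h1, ih, asciiAlpha]
    · by_cases h2 : 97 ≤ c.toNat ∧ c.toNat ≤ 122
      · simp [h1, h2, ih, asciiAlpha]
      · have ha : asciiAlpha c = false := by
          simp [asciiAlpha]; omega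
        simp [h1, h2, ih, ha]

-- on ASCII, the table lookup equals the arithmetic map, and Python isalpha is the ASCII letter test
set_option maxRecDepth 4000 in
theorem ascii_char_facts :
    ∀ n : Fin 127, translateChar (Char.ofNat n.val) = rotCharB (Char.ofNat n.val) ∧
      PySem.Chars.isalpha (Char.ofNat n.val) = asciiAlpha (Char.ofNat n.val) := by
  decide

theorem dom_facts (c : Char) (h : pvDomChar c = true) :
    translateChar c = rotCharB c ∧ PySem.Chars.isalpha c = asciiAlpha c := by
  have hle : c.toNat < 127 := by
    simp [pvDomChar] at h; omega
  have := ascii_char_facts ⟨c.toNat, hle⟩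
  simpa [Char.ofNat_toNat] using this

theorem mem_strip {c : Char} {l : List Char} (h : c ∈ PySem.Chars.strip l) : c ∈ l := by
  simp only [PySem.Chars.strip, PySem.Chars.rstrip, PySem.Chars.lstrip] at h
  have h1 := (List.dropWhile_sublist (l := (List.dropWhile PySem.Chars.isspace l).reverse)
      (p := PySem.Chars.isspace)).subset (List.mem_reverse.mp h)
  exact (List.dropWhile_sublist (p := PySem.Chars.isspace)).subset (List.mem_reverse.mp h1)

theorem any_congr_mem {α : Type} {p q : α → Bool} (l : List α)
    (h : ∀ c ∈ l, p c = q c) : l.any p = l.any q := by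
  induction l with
  | nil => rfl
  | cons c t ih =>
    simp only [List.any_cons, h c List.mem_cons_self,
      ih (fun x hx => h x (List.mem_cons_of_mem c hx))]

-- ===== VERDICT (by name: the statement is the Claim_ definition above) =====
theorem try_rot13_spec : Claim_equal_try_rot13 := by
  intro data hdom
  simp only [Dom_try_rot13, pvDomStr, List.all_eq_true] at hdom
  unfold Spec_try_rot13 try_rot13 try_rot13_alt
  rw [foldl_rotStep]
  simp only [List.nil_append, Bool.false_or, PySem.Str.toList_strip]
  generalize hl : PySem.Chars.strip data.toList = l
  have hdomc : ∀ c ∈ l, translateChar c = rotCharB c ∧ PySem.Chars.isalpha c = asciiAlpha c := by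
    intro c hc
    have hc' : c ∈ PySem.Chars.strip data.toList := by rw [hl]; exact hc
    exact dom_facts c (hdom c (mem_strip hc'))
  have hany : l.any PySem.Chars.isalpha = l.any asciiAlpha :=
    any_congr_mem l (fun c hc => (hdomc c hc).2)
  have hmap : l.map translateChar = l.map rotCharB :=
    List.map_congr_left (fun c hc => (hdomc c hc).1)
  rw [hany, hmap]
  by_cases h1 : l = []
  · simp [h1]
  · by_cases h2 : l.any asciiAlpha
    · simp [h1, h2]
    · simp [h1, h2]
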